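-- pv_equiv track=rewrite | github.com/bcit-tlu/hriv | scripts/check_nginx_configs_in_sync.py | _extract_block_scalar
-- ===== SOURCE A (Python) =====
-- from typing import Optional
--
-- def _extract_block_scalar(yaml_text: str, sentinel: str) -> Optional[str]:
--     """Return the contents of the ``|-`` block scalar following ``sentinel``.
--
--     The block scalar is assumed to be indented more deeply than the line
--     containing ``sentinel``; we use the first non-empty line's indent as
--     the reference prefix and strip exactly that many leading spaces from
--     every subsequent line.  The scalar ends at the first line whose
--     indentation is less than or equal to the sentinel's own indent (or
--     at end-of-file).
--     """
--     lines = yaml_text.splitlines()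
--     for i, line in enumerate(lines):
--         if line.lstrip().startswith(sentinel):
--             sentinel_indent = len(line) - len(line.lstrip())
--             break
--     else:
--         return None
--
--     # Find the first non-empty line after the sentinel to determine the
--     # block scalar's base indentation.
--     base_indent: Optional[int] = None
--     scalar_lines: list[str] = []
--     for j in range(i + 1, len(lines)):
--         body = lines[j]
--         if body.strip() == "":
--             scalar_lines.append("")
--             continue
--         current_indent = len(body) - len(body.lstrip())
--         if current_indent <= sentinel_indent:
--             # Dedented back out of the scalar — we're done.
--             break
--         if base_indent is None:
--             base_indent = current_indent
--         # Strip exactly ``base_indent`` spaces (preserve any excess, which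
--         # is meaningful inside nginx ``server {}`` block content).
--         scalar_lines.append(body[base_indent:])
--
--     if base_indent is None:
--         return ""
--
--     # ``|-`` strips the final trailing newline; emulate that by popping
--     # any trailing blank lines before re-joining.
--     while scalar_lines and scalar_lines[-1] == "":
--         scalar_lines.pop()
--     return "\n".join(scalar_lines) + "\n"
-- ===== SOURCE B (Python) =====
-- from typing import Optional
--
--
-- def _extract_block_scalar(yaml_text: str, sentinel: str) -> Optional[str]:
--     """Slice-based re-implementation: locate the sentinel, cut the block out
--     with an explicit stop index, then dedent it in a comprehension."""
--     lines = yaml_text.splitlines()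
--
--     def indent(ln: str) -> int:
--         return len(ln) - len(ln.lstrip())
--
--     hit = next((k for k, ln in enumerate(lines)
--                 if ln.lstrip().startswith(sentinel)), None)
--     if hit is None:
--         return None
--     si = indent(lines[hit])
--
--     rest = lines[hit + 1:]
--     stop = next((k for k, ln in enumerate(rest)
--                  if ln.strip() != "" and indent(ln) <= si), len(rest))
--     block = rest[:stop]
--
--     first = next((ln for ln in block if ln.strip() != ""), None)
--     if first is None:
--         return ""
--     base = indent(first)
--
--     out = ["" if ln.strip() == "" else ln[base:] for ln in block]
--     while out and out[-1] == "":
--         out.pop()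
--     return "\n".join(out) + "\n"
-- ===== Notes on version B (the rewrite author's own statement) =====
-- stated objective: alternative
-- what changed: A's single fused state-machine loop with a mutable Optional base_indent and in-loop break/append is replaced by slice-based passes: cut the block out at an explicitly computed stop index, find the first non-blank line for the base indent, then dedent the whole block in one comprehension.
import Mathlib
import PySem

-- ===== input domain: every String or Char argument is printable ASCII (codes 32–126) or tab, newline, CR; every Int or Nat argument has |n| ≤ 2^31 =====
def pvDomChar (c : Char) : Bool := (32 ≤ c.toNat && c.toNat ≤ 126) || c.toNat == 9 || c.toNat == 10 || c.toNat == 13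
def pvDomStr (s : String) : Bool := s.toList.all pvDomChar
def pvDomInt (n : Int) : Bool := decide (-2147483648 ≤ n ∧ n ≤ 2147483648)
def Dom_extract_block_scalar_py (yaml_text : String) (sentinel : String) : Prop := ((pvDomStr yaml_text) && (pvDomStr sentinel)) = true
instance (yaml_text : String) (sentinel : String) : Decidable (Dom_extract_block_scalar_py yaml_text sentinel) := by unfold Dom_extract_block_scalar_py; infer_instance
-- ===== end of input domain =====

-- B replaces A's single fused state-machine loop (mutable Optional base_indent) by
-- slice-based passes: cut the block out at an explicit stop index, find the base
-- indent, dedent in one comprehension; same cost, different decomposition.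

-- shared idiom of both Pythons: len(ln) - len(ln.lstrip()) and ln.strip() == ""
def pvIndent (l : List Char) : Nat := l.length - (PySem.Chars.lstrip l).length
def pvBlank (l : List Char) : Bool := PySem.Chars.strip l == []
-- shared idiom of both Pythons: 'while out and out[-1] == "": out.pop()'
def pvPopTrailing : List (List Char) → List (List Char)
  | [] => []
  | l :: ls =>
    match pvPopTrailing ls with
    | [] => if l == [] then [] else [l]
    | r => l :: r

-- ===== PORT A =====
-- A's first for/enumerate/break loop: first line whose lstrip startswith sentinel,
-- returning (its indent, the lines after it)
def pvAFind (sent : List Char) : List (List Char) → Option (Nat × List (List Char))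
  | [] => none
  | l :: ls =>
    if PySem.Chars.startswith (PySem.Chars.lstrip l) sent then some (pvIndent l, ls)
    else pvAFind sent ls

-- A's second loop over range(i+1, len(lines)) with state (base_indent, scalar_lines)
def pvALoop (sIndent : Nat) (base : Option Nat) (acc : List (List Char)) :
    List (List Char) → Option Nat × List (List Char)
  | [] => (base, acc)
  | l :: ls =>
    if pvBlank l then pvALoop sIndent base (acc ++ [[]]) ls
    else
      let cur := pvIndent l
      if cur ≤ sIndent then (base, acc)
      else
        let b := base.getD cur
        pvALoop sIndent (some b) (acc ++ [PySem.List.slice l (some (b : Int)) none]) ls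

def extract_block_scalar_py (yaml_text : String) (sentinel : String) : Option String :=
  let lines := (PySem.Str.splitlines yaml_text).map String.toList
  match pvAFind sentinel.toList lines with
  | none => none
  | some (sIndent, rest) =>
    match pvALoop sIndent none [] rest with
    | (none, _) => some ""
    | (some _, scalarLines) =>
      some (String.ofList (PySem.Chars.join ['\n'] (pvPopTrailing scalarLines) ++ ['\n']))

-- ===== PORT B =====
def extract_block_scalar_py_alt (yaml_text : String) (sentinel : String) : Option String :=
  let lines := (PySem.Str.splitlines yaml_text).map String.toList
  let sent := sentinel.toList
  match lines.findIdx? (fun ln => PySem.Chars.startswith (PySem.Chars.lstrip ln) sent) with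
  | none => none
  | some hit =>
    let si := pvIndent (lines.getD hit [])
    let rest := lines.drop (hit + 1)
    let stop := (rest.findIdx? (fun ln => !pvBlank ln && decide (pvIndent ln ≤ si))).getD rest.length
    let block := rest.take stop
    match block.find? (fun ln => !pvBlank ln) with
    | none => some ""
    | some first =>
      let base := pvIndent first
      let out := block.map (fun ln => if pvBlank ln then [] else PySem.List.slice ln (some (base : Int)) none)
      some (String.ofList (PySem.Chars.join ['\n'] (pvPopTrailing out) ++ ['\n']))

-- ===== PRECONDITION & SPEC =====
def Spec_extract_block_scalar_py (yaml_text : String) (sentinel : String) (out : Option String) : Prop := out = extract_block_scalar_py_alt yaml_text sentinel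
instance (yaml_text : String) (sentinel : String) (out : Option String) : Decidable (Spec_extract_block_scalar_py yaml_text sentinel out) := by unfold Spec_extract_block_scalar_py; infer_instance

-- ===== CLAIM (what is proved, stated in full; the proofs are below) =====
def Claim_equal_extract_block_scalar_py : Prop := ∀ (yaml_text : String) (sentinel : String), Dom_extract_block_scalar_py yaml_text sentinel → Spec_extract_block_scalar_py yaml_text sentinel (extract_block_scalar_py yaml_text sentinel)

-- ===== LEMMAS AND PROOFS =====

-- A's sentinel search equals B's findIdx?-then-index form
theorem pvAFind_eq (sent : List Char) (lines : List (List Char)) :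
    pvAFind sent lines =
      (lines.findIdx? (fun ln => PySem.Chars.startswith (PySem.Chars.lstrip ln) sent)).map
        (fun i => (pvIndent (lines.getD i []), lines.drop (i + 1))) := by
  induction lines with
  | nil => rfl
  | cons l ls ih =>
    rw [List.findIdx?_cons]
    by_cases h : PySem.Chars.startswith (PySem.Chars.lstrip l) sent
    · simp [pvAFind, h]
    · simp only [pvAFind, h, Bool.false_eq_true, if_false, ih]
      cases ls.findIdx? (fun ln => PySem.Chars.startswith (PySem.Chars.lstrip ln) sent) with
      | none => rfl
      | some i => simp

-- B's block cut: rest.take of the first-stop index is a takeWhile of the kept condition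
theorem take_findIdx?_eq_takeWhile (p : List Char → Bool) (rest : List (List Char)) :
    rest.take ((rest.findIdx? p).getD rest.length) = rest.takeWhile (fun x => !p x) := by
  induction rest with
  | nil => rfl
  | cons l ls ih =>
    rw [List.findIdx?_cons, List.takeWhile_cons]
    by_cases h : p l
    · rw [if_pos h]
      simp [h]
    · rw [if_neg h, if_pos (by simp [h])]
      cases hf : ls.findIdx? p with
      | none => rw [hf] at ih; simpa using congrArg (List.cons l) ih
      | some i => rw [hf] at ih; simpa using congrArg (List.cons l) ih

-- the kept condition of B's cut, as used below
def pvKeep (si : Nat) (ln : List Char) : Bool := pvBlank ln || decide (si < pvIndent ln)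

theorem keep_eq (si : Nat) :
    (fun x => !(!pvBlank x && decide (pvIndent x ≤ si))) = pvKeep si := by
  funext x
  by_cases h : pvBlank x
  · simp [pvKeep, h]
  · simp only [pvKeep, h, Bool.false_or, Bool.not_false, Bool.true_and]
    rw [← decide_not]
    exact decide_eq_decide.mpr (by omega)

-- A's loop once the base indent is fixed: maps the kept prefix through the dedent
theorem pvALoop_some (si b : Nat) (rest : List (List Char)) (acc : List (List Char)) :
    pvALoop si (some b) acc rest =
      (some b, acc ++ (rest.takeWhile (pvKeep si)).map
        (fun ln => if pvBlank ln then [] else PySem.List.slice ln (some (b : Int)) none)) := by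
  induction rest generalizing acc with
  | nil => simp [pvALoop]
  | cons l ls ih =>
    rw [List.takeWhile_cons]
    by_cases hb : pvBlank l
    · rw [if_pos (by simp [pvKeep, hb])]
      simp only [pvALoop, hb, if_true, ih]
      simp [hb]
    · by_cases hle : pvIndent l ≤ si
      · have hk : pvKeep si l = false := by
          simp only [pvKeep, hb, Bool.false_or, decide_eq_false_iff_not]; omega
        rw [if_neg (by simp [hk])]
        simp only [pvALoop, hb, Bool.false_eq_true, if_false]
        rw [if_pos hle]
        simp
      · have hk : pvKeep si l = true := by
          simp only [pvKeep, Bool.or_eq_true, decide_eq_true_eq]; omega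
        rw [if_pos hk]
        simp only [pvALoop, hb, Bool.false_eq_true, if_false]
        rw [if_neg hle]
        simp only [Option.getD_some, ih]
        simp [hb]
-- A's loop with no base yet, against B's find-first-nonblank + map
theorem pvALoop_none (si : Nat) (rest : List (List Char)) (acc : List (List Char)) :
    pvALoop si none acc rest =
      match (rest.takeWhile (pvKeep si)).find? (fun ln => !pvBlank ln) with
      | none => (none, acc ++ (rest.takeWhile (pvKeep si)).map (fun _ => ([] : List Char)))
      | some first =>
          (some (pvIndent first), acc ++ (rest.takeWhile (pvKeep si)).map
            (fun ln => if pvBlank ln then [] else PySem.List.slice ln (some ((pvIndent first) : Int)) none)) := by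
  induction rest generalizing acc with
  | nil => simp [pvALoop]
  | cons l ls ih =>
    rw [List.takeWhile_cons]
    by_cases hb : pvBlank l
    · have hk : pvKeep si l = true := by simp [pvKeep, hb]
      rw [if_pos hk, List.find?_cons]
      simp only [hb, Bool.not_true]
      simp only [pvALoop, hb, if_true]
      rw [ih]
      cases (ls.takeWhile (pvKeep si)).find? (fun ln => !pvBlank ln) with
      | none => simp
      | some first => simp [hb]
    · by_cases hle : pvIndent l ≤ si
      · have hk : pvKeep si l = false := by
          simp only [pvKeep, hb, Bool.false_or, decide_eq_false_iff_not]; omega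
        rw [if_neg (by simp [hk])]
        simp only [pvALoop, hb, Bool.false_eq_true, if_false]
        rw [if_pos hle]
        simp
      · have hk : pvKeep si l = true := by
          simp only [pvKeep, Bool.or_eq_true, decide_eq_true_eq]; omega
        rw [if_pos hk, List.find?_cons]
        simp only [hb, Bool.not_false]
        simp only [pvALoop, hb, Bool.false_eq_true, if_false]
        rw [if_neg hle]
        simp only [Option.getD_none]
        rw [pvALoop_some]
        simp [hb]

-- ===== VERDICT (by name: the statement is the Claim_ definition above) =====
theorem extract_block_scalar_py_spec : Claim_equal_extract_block_scalar_py := by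
  intro yaml_text sentinel _
  show extract_block_scalar_py yaml_text sentinel = extract_block_scalar_py_alt yaml_text sentinel
  simp only [extract_block_scalar_py, extract_block_scalar_py_alt]
  rw [pvAFind_eq]
  cases hf : (((PySem.Str.splitlines yaml_text).map String.toList).findIdx?
      (fun ln => PySem.Chars.startswith (PySem.Chars.lstrip ln) sentinel.toList)) with
  | none => rfl
  | some i =>
    simp only [Option.map_some]
    rw [take_findIdx?_eq_takeWhile, keep_eq, pvALoop_none]
    cases ((((PySem.Str.splitlines yaml_text).map String.toList).drop (i + 1)).takeWhile
        (pvKeep (pvIndent (((PySem.Str.splitlines yaml_text).map String.toList).getD i [])))).find?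
        (fun ln => !pvBlank ln) with
    | none => rfl
    | some first => simp
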